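-- pv_equiv track=rewrite | github.com/joya-kogo/arihon_training | elementary/p121.py | prison
-- ===== SOURCE A (Python) =====
-- def prison(now_p, now_a):
-- 	if len(now_a) == 0:
-- 		return 0
-- 	pmid = int((now_p-1)/2)
-- 	m = float("inf")
-- 	idx = -1
-- 	for j in range(len(now_a)):
-- 		if pmid-(now_a[j]-1) < m:
-- 			m = abs(pmid-(now_a[j]-1))
-- 			idx = j
-- 	res = now_p - 1
-- 	head = now_a[idx]-1
-- 	tail = now_p-now_a[idx]
-- 	head_a = now_a[0:idx]
-- 	tail_a = now_a[idx+1:len(now_a)]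
-- 	res = now_p - 1 + prison(head, head_a) + prison(tail, tail_a)
-- 	return res
-- ===== SOURCE B (Python) =====
-- def prison(now_p, now_a):
--     # iterative worklist version: explicit stack + running total instead of recursion;
--     # the index scan is seeded with element 0 instead of a float("inf") sentinel
--     total = 0
--     stack = [(now_p, now_a)]
--     while stack:
--         p, a = stack.pop()
--         if not a:
--             continue
--         pmid = int((p - 1) / 2)
--         idx = 0
--         m = abs(pmid - (a[0] - 1))
--         for j in range(1, len(a)):
--             d = pmid - (a[j] - 1)
--             if d < m:
--                 idx = j
--                 m = abs(d)
--         total += p - 1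
--         stack.append((a[idx] - 1, a[:idx]))
--         stack.append((p - a[idx], a[idx + 1:]))
--     return total
-- ===== Notes on version B (the rewrite author's own statement) =====
-- stated objective: alternative
-- what changed: Replaces the self-recursive split with an explicit worklist (stack) loop that accumulates (p-1) per nonempty work item, and seeds the index scan with element 0 instead of a float('inf') sentinel.
import Mathlib
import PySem

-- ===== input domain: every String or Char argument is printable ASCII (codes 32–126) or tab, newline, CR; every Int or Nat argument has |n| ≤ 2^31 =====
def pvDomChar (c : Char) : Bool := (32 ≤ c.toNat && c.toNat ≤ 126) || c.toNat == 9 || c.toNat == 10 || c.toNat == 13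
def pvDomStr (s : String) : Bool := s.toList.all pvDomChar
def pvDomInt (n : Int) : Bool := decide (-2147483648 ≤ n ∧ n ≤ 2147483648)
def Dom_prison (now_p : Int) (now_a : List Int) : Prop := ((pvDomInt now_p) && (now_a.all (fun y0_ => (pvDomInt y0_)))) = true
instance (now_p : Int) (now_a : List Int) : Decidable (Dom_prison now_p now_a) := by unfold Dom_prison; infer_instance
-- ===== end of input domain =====

-- B replaces the recursion by an explicit worklist loop with a running total; same return value is proved.
-- (int((now_p-1)/2) is ported as truncating division, exact on the |int| ≤ 2^31 domain.)

-- ===== PORT A =====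
-- the for-loop body: state (m, idx), m = float("inf") ported as none
def stepA (pmid : Int) (a : List Int) (s : Option Int × Int) (j : Int) : Option Int × Int :=
  match s.1 with
  | none => (some |pmid - (PySem.List.pyGetD a j 0 - 1)|, j)   -- anything < inf
  | some m =>
    if pmid - (PySem.List.pyGetD a j 0 - 1) < m then
      (some |pmid - (PySem.List.pyGetD a j 0 - 1)|, j)
    else s

def selIdxA (pmid : Int) (a : List Int) : Int :=
  ((PySem.List.pyRange 0 a.length 1).foldl (stepA pmid a) (none, -1)).2

-- range facts needed by prison's termination argument (cited in decreasing_by)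
theorem stepA_fold_range (pmid : Int) (a : List Int) (l : List Int) (s : Option Int × Int)
    (hs : 0 ≤ s.2 ∧ s.2 < (a.length : Int)) (hl : ∀ j ∈ l, 0 ≤ j ∧ j < (a.length : Int)) :
    0 ≤ (l.foldl (stepA pmid a) s).2 ∧ (l.foldl (stepA pmid a) s).2 < (a.length : Int) := by
  induction l generalizing s with
  | nil => exact hs
  | cons x xs ih =>
    refine ih _ ?_ (fun j hj => hl j (List.mem_cons_of_mem _ hj))
    have hx := hl x List.mem_cons_self
    rcases s with ⟨m?, i⟩
    cases m? with
    | none => simpa [stepA] using hx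
    | some m =>
      by_cases hc : pmid - (PySem.List.pyGetD a x 0 - 1) < m
      · simpa [stepA, hc] using hx
      · simpa [stepA, hc] using hs

theorem selIdxA_range (pmid : Int) (a : List Int) (h : 0 < a.length) :
    0 ≤ selIdxA pmid a ∧ selIdxA pmid a < (a.length : Int) := by
  unfold selIdxA
  rw [PySem.List.pyRange_one_cons (by exact_mod_cast h)]
  simp only [List.foldl_cons]
  have h0 : stepA pmid a (none, -1) 0 = (some |pmid - (PySem.List.pyGetD a 0 0 - 1)|, 0) := rfl
  rw [h0]
  refine stepA_fold_range pmid a _ _ ⟨by simp, by simp; omega⟩ (fun j hj => ?_)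
  have := (PySem.List.mem_pyRange_one).1 hj
  omega

theorem len_slice_head (a : List Int) (i : Int) (h0 : 0 ≤ i) (h1 : i < (a.length : Int)) :
    (PySem.List.slice a (some 0) (some i)).length = i.toNat := by
  rw [PySem.List.slice_toNat a (le_refl 0) h0]
  simp; omega

theorem len_slice_tail (a : List Int) (i : Int) (h0 : 0 ≤ i) (h1 : i < (a.length : Int)) :
    (PySem.List.slice a (some (i + 1)) (some (a.length : Int))).length = a.length - i.toNat - 1 := by
  rw [PySem.List.slice_toNat a (by omega) (by omega)]
  simp; omega

def prison (now_p : Int) (now_a : List Int) : Int :=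
  if now_a.length = 0 then 0
  else
    now_p - 1
      + prison (PySem.List.pyGetD now_a (selIdxA ((now_p - 1).tdiv 2) now_a) 0 - 1)
          (PySem.List.slice now_a (some 0) (some (selIdxA ((now_p - 1).tdiv 2) now_a)))
      + prison (now_p - PySem.List.pyGetD now_a (selIdxA ((now_p - 1).tdiv 2) now_a) 0)
          (PySem.List.slice now_a (some (selIdxA ((now_p - 1).tdiv 2) now_a + 1)) (some (now_a.length : Int)))
termination_by now_a.length
decreasing_by
  · have h := selIdxA_range ((now_p - 1).tdiv 2) now_a (by omega)
    rw [len_slice_head now_a _ h.1 h.2]; omega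
  · have h := selIdxA_range ((now_p - 1).tdiv 2) now_a (by omega)
    rw [len_slice_tail now_a _ h.1 h.2]; omega

-- ===== PORT B =====
-- inner scan of Source B: state (idx, m) seeded with element 0, loop over range(1, len(a))
def stepB (pmid : Int) (a : List Int) (s : Int × Int) (j : Int) : Int × Int :=
  if pmid - (PySem.List.pyGetD a j 0 - 1) < s.2 then
    (j, |pmid - (PySem.List.pyGetD a j 0 - 1)|)
  else s

def pickIdxB (pmid : Int) (a : List Int) : Int :=
  ((PySem.List.pyRange 1 a.length 1).foldl (stepB pmid a)
      (0, |pmid - (PySem.List.pyGetD a 0 0 - 1)|)).1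

theorem stepB_fold_range (pmid : Int) (a : List Int) (l : List Int) (s : Int × Int)
    (hs : 0 ≤ s.1 ∧ s.1 < (a.length : Int)) (hl : ∀ j ∈ l, 0 ≤ j ∧ j < (a.length : Int)) :
    0 ≤ (l.foldl (stepB pmid a) s).1 ∧ (l.foldl (stepB pmid a) s).1 < (a.length : Int) := by
  induction l generalizing s with
  | nil => exact hs
  | cons x xs ih =>
    refine ih _ ?_ (fun j hj => hl j (List.mem_cons_of_mem _ hj))
    have hx := hl x List.mem_cons_self
    by_cases hc : pmid - (PySem.List.pyGetD a x 0 - 1) < s.2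
    · simpa [stepB, hc] using hx
    · simpa [stepB, hc] using hs

theorem pickIdxB_range (pmid : Int) (a : List Int) (h : 0 < a.length) :
    0 ≤ pickIdxB pmid a ∧ pickIdxB pmid a < (a.length : Int) := by
  unfold pickIdxB
  refine stepB_fold_range pmid a _ _ ⟨by simp, by simp; omega⟩ (fun j hj => ?_)
  have := (PySem.List.mem_pyRange_one).1 hj
  omega

-- the while-loop over the explicit stack (Lean list head = top of the Python stack)
def runB : List (Int × List Int) → Int → Int
  | [], acc => acc
  | (p, a) :: st, acc =>
    if a.length = 0 then runB st acc
    else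
      runB ((p - PySem.List.pyGetD a (pickIdxB ((p - 1).tdiv 2) a) 0,
              PySem.List.slice a (some (pickIdxB ((p - 1).tdiv 2) a + 1)) (some (a.length : Int))) ::
            (PySem.List.pyGetD a (pickIdxB ((p - 1).tdiv 2) a) 0 - 1,
              PySem.List.slice a (some 0) (some (pickIdxB ((p - 1).tdiv 2) a))) :: st)
           (acc + (p - 1))
termination_by st _ => (st.map (fun x => 2 * x.2.length + 1)).sum
decreasing_by
  · simp
  · have h := pickIdxB_range ((p - 1).tdiv 2) a (by omega)
    simp only [List.map_cons, List.sum_cons]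
    rw [len_slice_head a _ h.1 h.2, len_slice_tail a _ h.1 h.2]
    omega

def prison_alt (now_p : Int) (now_a : List Int) : Int := runB [(now_p, now_a)] 0

-- ===== PRECONDITION & SPEC =====
def Spec_prison (now_p : Int) (now_a : List Int) (out : Int) : Prop := out = prison_alt now_p now_a
instance (now_p : Int) (now_a : List Int) (out : Int) : Decidable (Spec_prison now_p now_a out) := by unfold Spec_prison; infer_instance

-- ===== CLAIM (what is proved, stated in full; the proofs are below) =====
def Claim_equal_prison : Prop := ∀ (now_p : Int) (now_a : List Int), Dom_prison now_p now_a → Spec_prison now_p now_a (prison now_p now_a)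

-- ===== LEMMAS AND PROOFS =====

-- once A's state carries some m, the two scans walk in lockstep
theorem fold_AB (pmid : Int) (a : List Int) (l : List Int) (m idx : Int) :
    (l.foldl (stepA pmid a) (some m, idx)).2 = (l.foldl (stepB pmid a) (idx, m)).1 := by
  induction l generalizing m idx with
  | nil => rfl
  | cons x xs ih =>
    simp only [List.foldl_cons]
    by_cases hc : pmid - (PySem.List.pyGetD a x 0 - 1) < m
    · simp only [stepA, stepB, if_pos hc]
      exact ih _ _
    · simp only [stepA, stepB, if_neg hc]
      exact ih _ _

-- both index scans pick the same index on a nonempty list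
theorem idx_eq (pmid : Int) (a : List Int) (h : 0 < a.length) :
    selIdxA pmid a = pickIdxB pmid a := by
  unfold selIdxA pickIdxB
  rw [PySem.List.pyRange_one_cons (by exact_mod_cast h)]
  simp only [List.foldl_cons]
  have h0 : stepA pmid a (none, -1) 0 = (some |pmid - (PySem.List.pyGetD a 0 0 - 1)|, 0) := rfl
  rw [h0, fold_AB]
  norm_num

-- the worklist loop folds away one item exactly as the recursion does
theorem runB_push : ∀ (N : Nat) (p : Int) (a : List Int) (st : List (Int × List Int)) (acc : Int),
    a.length ≤ N → runB ((p, a) :: st) acc = runB st (acc + prison p a) := by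
  intro N
  induction N with
  | zero =>
    intro p a st acc hle
    have ha : a.length = 0 := by omega
    rw [runB, if_pos ha, prison, if_pos ha]
    simp
  | succ N ih =>
    intro p a st acc hle
    by_cases ha : a.length = 0
    · rw [runB, if_pos ha, prison, if_pos ha]
      simp
    · have hpos : 0 < a.length := Nat.pos_of_ne_zero ha
      have hr := pickIdxB_range ((p - 1).tdiv 2) a hpos
      have hpa : prison p a = p - 1
          + prison (PySem.List.pyGetD a (selIdxA ((p - 1).tdiv 2) a) 0 - 1)
              (PySem.List.slice a (some 0) (some (selIdxA ((p - 1).tdiv 2) a)))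
          + prison (p - PySem.List.pyGetD a (selIdxA ((p - 1).tdiv 2) a) 0)
              (PySem.List.slice a (some (selIdxA ((p - 1).tdiv 2) a + 1)) (some (a.length : Int))) := by
        rw [prison, if_neg ha]
      rw [idx_eq _ _ hpos] at hpa
      rw [runB, if_neg ha]
      rw [ih _ _ _ _ (by rw [len_slice_tail a _ hr.1 hr.2]; omega)]
      rw [ih _ _ _ _ (by rw [len_slice_head a _ hr.1 hr.2]; omega)]
      rw [hpa]
      congr 1
      ring

theorem prison_eq_alt (now_p : Int) (now_a : List Int) :
    prison now_p now_a = prison_alt now_p now_a := by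
  unfold prison_alt
  rw [runB_push now_a.length now_p now_a [] 0 (le_refl _), runB]
  omega

-- ===== VERDICT (by name: the statement is the Claim_ definition above) =====
theorem prison_spec : Claim_equal_prison := by
  intro now_p now_a _
  unfold Spec_prison
  exact prison_eq_alt now_p now_a
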